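-- pv_equiv track=rewrite | github.com/lamm-mit/MusicAnalysis | src/music_analysis/theory.py | iter_scale_masks
-- ===== SOURCE A (Python) =====
-- from typing import Iterable, Iterator, List, Optional, Sequence, Tuple
--
-- N_PCS_DEFAULT = 12
--
-- def pcs_from_mask(mask: int, n: int = N_PCS_DEFAULT) -> List[int]:
--     return [i for i in range(n) if (mask >> i) & 1]
--
-- def step_vector_from_pcs(pcs: Sequence[int], n: int = N_PCS_DEFAULT) -> List[int]:
--     pcs = sorted(pcs)
--     if len(pcs) <= 1:
--         return []
--     steps = [b - a for a, b in zip(pcs, pcs[1:])]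
--     steps.append((pcs[0] + n) - pcs[-1])
--     return steps
--
-- def max_circular_gap(pcs: Sequence[int], n: int = N_PCS_DEFAULT) -> int:
--     if len(pcs) <= 1:
--         return n
--     return max(step_vector_from_pcs(pcs, n))
--
-- def iter_scale_masks(
--     n: int = N_PCS_DEFAULT,
--     require_root: bool = True,
--     min_k: int = 1,
--     max_k: Optional[int] = None,
--     max_gap: Optional[int] = None,
-- ) -> Iterator[int]:
--     """Iterate bitmasks satisfying constraints.
--
--     - n: number of pitch classes on the circle (default 12)
--     - require_root: if True, require pc 0 to be present
--     - min_k/max_k: filter by set size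
--     - max_gap: maximum allowed circular step size between successive pcs
--     """
--     if max_k is None:
--         max_k = n
--     root_mask = 1 if require_root else 0
--     full = 1 << n
--     for mask in range(full):
--         if require_root and (mask & 1) == 0:
--             continue
--         k = mask.bit_count()
--         if k < min_k or k > max_k or k == 0:
--             continue
--         pcs = pcs_from_mask(mask, n)
--         if max_gap is not None and max_circular_gap(pcs, n) > max_gap:
--             continue
--         yield mask
-- ===== SOURCE B (Python) =====
-- from typing import Iterator, Optional
--
-- N_PCS_DEFAULT = 12
--
-- def pcs_from_mask(mask, n):
--     return [i for i in range(n) if (mask >> i) & 1]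
--
-- def iter_scale_masks(
--     n: int = N_PCS_DEFAULT,
--     require_root: bool = True,
--     min_k: int = 1,
--     max_k: Optional[int] = None,
--     max_gap: Optional[int] = None,
-- ) -> Iterator[int]:
--     """Explicit-stack DFS over bits n-1..0 (exclude-then-include), pruning by the
--     popcount window and forcing the root bit; emits masks in increasing order."""
--     if max_k is None:
--         max_k = n
--     lo = max(min_k, 1)
--
--     def gap_ok(mask):
--         if max_gap is None:
--             return True
--         pcs = pcs_from_mask(mask, n)
--         if len(pcs) <= 1:
--             return n <= max_gap
--         g = pcs[0] + n - pcs[-1]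
--         for a, b in zip(pcs, pcs[1:]):
--             if b - a > g:
--                 g = b - a
--         return g <= max_gap
--
--     stack = [(n, 0, 0)]  # (undecided low bits, mask so far, popcount so far)
--     while stack:
--         i, mask, k = stack.pop()
--         if k > max_k or k + i < lo:
--             continue
--         if i == 0:
--             if gap_ok(mask):
--                 yield mask
--             continue
--         stack.append((i - 1, mask | (1 << (i - 1)), k + 1))
--         if not (i == 1 and require_root):
--             stack.append((i - 1, mask, k))
-- ===== Notes on version B (the rewrite author's own statement) =====
-- stated objective: alternative
-- what changed: Replaces the linear scan of all 2^n masks (with per-mask pcs list building, sorting and a step-vector max) by a DFS over bits n-1..0 that prunes whole subtrees via the popcount window [max(min_k,1), max_k] and forces the root bit, checking the circular-gap constraint with a single running-max pass at the leaves; prunes to O(n * #feasible-prefixes) when the size window is narrow, though not measurably faster on windowless inputs.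
import Mathlib
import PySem

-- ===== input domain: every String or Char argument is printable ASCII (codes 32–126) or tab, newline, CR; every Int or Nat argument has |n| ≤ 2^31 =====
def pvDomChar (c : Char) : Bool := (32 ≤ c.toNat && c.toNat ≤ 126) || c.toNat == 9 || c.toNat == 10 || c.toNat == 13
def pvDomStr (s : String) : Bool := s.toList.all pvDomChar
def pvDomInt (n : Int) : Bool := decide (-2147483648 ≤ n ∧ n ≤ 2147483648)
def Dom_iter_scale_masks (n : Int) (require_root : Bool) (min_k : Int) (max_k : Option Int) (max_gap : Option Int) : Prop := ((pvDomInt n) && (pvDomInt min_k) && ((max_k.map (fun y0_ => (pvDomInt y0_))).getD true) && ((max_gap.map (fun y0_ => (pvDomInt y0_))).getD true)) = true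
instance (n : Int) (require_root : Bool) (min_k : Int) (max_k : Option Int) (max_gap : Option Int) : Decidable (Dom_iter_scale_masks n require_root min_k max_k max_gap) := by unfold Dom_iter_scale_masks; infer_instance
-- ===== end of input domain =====

-- B replaces A's scan of all 2^n masks by a popcount-pruned DFS over bits (root bit forced,
-- size window pruned, running-max gap check); equal output proved for all n ≥ 0 (A raises on n < 0).


-- ===== PORT A =====
-- [i for i in range(n) if (mask >> i) & 1]; i ≥ 0 in range, so 'mask >>> i.toNat' is exact
def pcs_from_mask (mask : Int) (n : Int) : List Int :=
  (PySem.List.pyRange 0 n 1).filter (fun i => PySem.Int.band (mask >>> i.toNat) 1 != 0)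

-- pcs[0] / pcs[-1] are reached only with len(pcs) ≥ 2, so the pyGetD default 0 is unreachable
def step_vector_from_pcs (pcs : List Int) (n : Int) : List Int :=
  let pcs := PySem.List.sorted pcs (fun x => x) false
  if PySem.List.len pcs ≤ 1 then []
  else
    let steps := (pcs.zip (PySem.List.slice pcs (some 1) none)).map (fun ab => ab.2 - ab.1)
    steps ++ [(PySem.List.pyGetD pcs 0 0 + n) - PySem.List.pyGetD pcs (-1) 0]

-- max() is applied only to a nonempty steps list, so the .getD 0 fallback is unreachable
def max_circular_gap (pcs : List Int) (n : Int) : Int :=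
  if PySem.List.len pcs ≤ 1 then n
  else (PySem.List.max? (step_vector_from_pcs pcs n) (fun x => x)).getD 0

-- 1 << n : exact for n ≥ 0 (Pre_); Python raises ValueError for n < 0
def iter_scale_masks (n : Int) (require_root : Bool) (min_k : Int) (max_k : Option Int) (max_gap : Option Int) : List Int :=
  let max_k : Int := max_k.getD n
  let _root_mask : Int := if require_root then 1 else 0
  let full : Int := (1 : Int) <<< n.toNat
  (PySem.List.pyRange 0 full 1).foldl (fun acc mask =>
    if require_root && (PySem.Int.band mask 1 == 0) then acc
    else
      let k : Int := (PySem.Int.bitCount mask : Int)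
      if k < min_k || k > max_k || k == 0 then acc
      else
        let pcs := pcs_from_mask mask n
        if max_gap.elim false (fun g => decide (max_circular_gap pcs n > g)) then acc
        else acc ++ [mask]) []

-- ===== PORT B =====
-- B's leaf check: one running-max pass over consecutive pcs (reuses the module's pcs helper)
def gapOkB (n : Int) (max_gap : Option Int) (mask : Int) : Bool :=
  match max_gap with
  | none => true
  | some mg =>
    let pcs := pcs_from_mask mask n
    if PySem.List.len pcs ≤ 1 then decide (n ≤ mg)
    else
      let g0 := PySem.List.pyGetD pcs 0 0 + n - PySem.List.pyGetD pcs (-1) 0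
      let g := (pcs.zip (PySem.List.slice pcs (some 1) none)).foldl (fun g ab => if ab.2 - ab.1 > g then ab.2 - ab.1 else g) g0
      decide (g ≤ mg)

-- the explicit DFS stack's termination measure (needed by loopB's well-founded recursion)
def stackMeasure (st : List (Nat × Int × Int)) : Nat :=
  (st.map (fun f => 3 ^ f.1)).sum

-- explicit-stack DFS over bits i-1..0 (exclude branch on top of the stack, so masks come
-- out increasing), pruned by the popcount window; transliterates Source B's while loop
def loopB (max_k lo n : Int) (require_root : Bool) (max_gap : Option Int) :
    List (Nat × Int × Int) → List Int → List Int
  | [], acc => acc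
  | (i, mask, k) :: rest, acc =>
    if k > max_k || k + (i : Int) < lo then loopB max_k lo n require_root max_gap rest acc
    else
      match i with
      | 0 =>
        loopB max_k lo n require_root max_gap rest
          (if gapOkB n max_gap mask then acc ++ [mask] else acc)
      | i' + 1 =>
        loopB max_k lo n require_root max_gap
          ((if i' + 1 == 1 && require_root then [] else [(i', mask, k)])
            ++ (i', PySem.Int.bor mask ((1 : Int) <<< i'), k + 1) :: rest) acc
  termination_by st _ => stackMeasure st
  decreasing_by
    · simp only [stackMeasure, List.map_cons, List.sum_cons]
      have hp : 0 < 3 ^ i := Nat.pow_pos (by norm_num)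
      omega
    · simp only [stackMeasure, List.map_cons, List.sum_cons, pow_zero]
      omega
    · simp only [stackMeasure, List.map_append, List.sum_append, List.map_cons, List.sum_cons]
      have h3 : 3 ^ (i' + 1) = 3 * 3 ^ i' := by ring
      have hp : 0 < 3 ^ i' := Nat.pow_pos (by norm_num)
      split
      · simp only [List.map_nil, List.sum_nil]; omega
      · simp only [List.map_cons, List.sum_cons, List.map_nil, List.sum_nil]; omega

def iter_scale_masks_alt (n : Int) (require_root : Bool) (min_k : Int) (max_k : Option Int) (max_gap : Option Int) : List Int :=
  let max_k : Int := max_k.getD n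
  let lo : Int := max min_k 1
  loopB max_k lo n require_root max_gap [(n.toNat, 0, 0)] []

-- ===== PRECONDITION & SPEC =====
-- Pre_ excludes exactly n < 0, on which A raises ValueError at '1 << n'
def Pre_iter_scale_masks (n : Int) (require_root : Bool) (min_k : Int) (max_k : Option Int) (max_gap : Option Int) : Prop := 0 ≤ n
instance (n : Int) (require_root : Bool) (min_k : Int) (max_k : Option Int) (max_gap : Option Int) : Decidable (Pre_iter_scale_masks n require_root min_k max_k max_gap) := by unfold Pre_iter_scale_masks; infer_instance
def pvWitness_iter_scale_masks : Int × Bool × Int × Option Int × Option Int := (4, true, 1, some 3, some 5)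

def Spec_iter_scale_masks (n : Int) (require_root : Bool) (min_k : Int) (max_k : Option Int) (max_gap : Option Int) (out : List Int) : Prop := out = iter_scale_masks_alt n require_root min_k max_k max_gap
instance (n : Int) (require_root : Bool) (min_k : Int) (max_k : Option Int) (max_gap : Option Int) (out : List Int) : Decidable (Spec_iter_scale_masks n require_root min_k max_k max_gap out) := by unfold Spec_iter_scale_masks; infer_instance

-- ===== CLAIM (what is proved, stated in full; the proofs are below) =====
def Claim_equal_iter_scale_masks : Prop := ∀ (n : Int) (require_root : Bool) (min_k : Int) (max_k : Option Int) (max_gap : Option Int), Dom_iter_scale_masks n require_root min_k max_k max_gap → Pre_iter_scale_masks n require_root min_k max_k max_gap → Spec_iter_scale_masks n require_root min_k max_k max_gap (iter_scale_masks n require_root min_k max_k max_gap)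


-- ===== LEMMAS AND PROOFS =====

-- A's per-mask keep condition, read off A's loop body
def keepP (n mink mk : Int) (rr : Bool) (mg : Option Int) (mask : Int) : Bool :=
  !(rr && (PySem.Int.band mask 1 == 0))
  && !((PySem.Int.bitCount mask : Int) < mink || (PySem.Int.bitCount mask : Int) > mk
        || (PySem.Int.bitCount mask : Int) == 0)
  && !(mg.elim false (fun g => decide (max_circular_gap (pcs_from_mask mask n) n > g)))


-- proof-side recursive view of the DFS (what each stack frame contributes)
def genR (max_k lo n : Int) (require_root : Bool) (max_gap : Option Int) : Nat → Int → Int → List Int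
  | i, mask, k =>
    if k > max_k || k + (i : Int) < lo then []
    else
      match i with
      | 0 => if gapOkB n max_gap mask then [mask] else []
      | i' + 1 =>
        (if i' + 1 == 1 && require_root then []
         else genR max_k lo n require_root max_gap i' mask k)
        ++ genR max_k lo n require_root max_gap i' (PySem.Int.bor mask ((1 : Int) <<< i')) (k + 1)

-- the stack loop folds to the recursive view, frame by frame
lemma loopB_spec (mkk lo n : Int) (rr : Bool) (mg : Option Int) :
    ∀ (st : List (Nat × Int × Int)) (acc : List Int),
      loopB mkk lo n rr mg st acc
        = acc ++ st.flatMap (fun f => genR mkk lo n rr mg f.1 f.2.1 f.2.2) := by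
  intro st acc
  induction st, acc using loopB.induct mkk lo n rr mg with
  | case1 acc =>
    rw [loopB.eq_def]
    simp
  | case2 i mask k rest acc hpr ih =>
    rw [loopB.eq_def]
    dsimp only
    rw [if_pos hpr, ih]
    have hg : genR mkk lo n rr mg i mask k = [] := by
      rw [genR.eq_def]
      dsimp only
      rw [if_pos hpr]
    simp [hg]
  | case3 mask k rest acc hpr ih =>
    rw [loopB.eq_def]
    dsimp only
    rw [if_neg hpr]
    rw [show loopB mkk lo n rr mg rest (if gapOkB n mg mask then acc ++ [mask] else acc)
          = (if gapOkB n mg mask then acc ++ [mask] else acc)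
            ++ rest.flatMap (fun f => genR mkk lo n rr mg f.1 f.2.1 f.2.2) from ih]
    have hg : genR mkk lo n rr mg 0 mask k = (if gapOkB n mg mask then [mask] else []) := by
      rw [genR.eq_def]
      dsimp only
      rw [if_neg hpr]
    rw [List.flatMap_cons, hg]
    split_ifs <;> simp
  | case4 mask k rest acc i' hpr ih =>
    rw [loopB.eq_def]
    dsimp only
    rw [if_neg hpr]
    rw [show loopB mkk lo n rr mg
          ((if (i' + 1 == 1 && rr) = true then [] else [(i', mask, k)])
            ++ (i', PySem.Int.bor mask ((1 : Int) <<< i'), k + 1) :: rest) acc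
          = acc ++ ((if (i' + 1 == 1 && rr) = true then [] else [(i', mask, k)])
            ++ (i', PySem.Int.bor mask ((1 : Int) <<< i'), k + 1) :: rest).flatMap
              (fun f => genR mkk lo n rr mg f.1 f.2.1 f.2.2) from ih]
    have hg : genR mkk lo n rr mg (i' + 1) mask k
        = (if (i' + 1 == 1 && rr) = true then [] else genR mkk lo n rr mg i' mask k)
          ++ genR mkk lo n rr mg i' (PySem.Int.bor mask ((1 : Int) <<< i')) (k + 1) := by
      rw [genR.eq_def]
      dsimp only
      rw [if_neg hpr]
    rw [List.flatMap_cons, hg, List.flatMap_append, List.flatMap_cons]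
    split_ifs <;> simp

def bcN (m : Nat) : Nat := PySem.Int.bitCount (m : Int)

lemma bc_two_step (m : Nat) : bcN m = m % 2 + bcN (m / 2) := by
  rcases Nat.eq_zero_or_pos m with h | h
  · subst h; simp [bcN, PySem.Int.bitCount_zero]
  · simpa [bcN] using PySem.Int.bitCount_natCast h

lemma bc_mul_add : ∀ (i m s : Nat), s < 2 ^ i → bcN (m * 2 ^ i + s) = bcN m + bcN s := by
  intro i
  induction i with
  | zero =>
    intro m s hs
    have hs0 : s = 0 := by omega
    subst hs0; simp [bcN, PySem.Int.bitCount_zero]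
  | succ i ih =>
    intro m s hs
    have e1 : m * 2 ^ (i + 1) = 2 * (m * 2 ^ i) := by ring
    have e2 : 2 ^ (i + 1) = 2 * 2 ^ i := by ring
    rw [bc_two_step (m * 2 ^ (i + 1) + s), bc_two_step s]
    have h1 : (m * 2 ^ (i + 1) + s) % 2 = s % 2 := by omega
    have h2 : (m * 2 ^ (i + 1) + s) / 2 = m * 2 ^ i + s / 2 := by omega
    have h3 : s / 2 < 2 ^ i := by omega
    rw [h1, h2, ih m (s / 2) h3]
    omega

lemma bc_le : ∀ (i s : Nat), s < 2 ^ i → bcN s ≤ i := by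
  intro i
  induction i with
  | zero =>
    intro s hs
    have hz : s = 0 := by omega
    subst hz
    simp [bcN, PySem.Int.bitCount_zero]
  | succ i ih =>
    intro s hs
    rw [bc_two_step s]
    have hp : 2 ^ (i + 1) = 2 * 2 ^ i := by ring
    have h3 : s / 2 < 2 ^ i := by omega
    have := ih (s / 2) h3
    omega

lemma bc_double (m : Nat) : bcN (2 * m) = bcN m := by
  rw [bc_two_step (2 * m)]
  have h1 : (2 * m) % 2 = 0 := by omega
  have h2 : (2 * m) / 2 = m := by omega
  rw [h1, h2]
  omega

lemma bc_double_succ (m : Nat) : bcN (2 * m + 1) = bcN m + 1 := by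
  rw [bc_two_step (2 * m + 1)]
  have h1 : (2 * m + 1) % 2 = 1 := by omega
  have h2 : (2 * m + 1) / 2 = m := by omega
  rw [h1, h2]; omega

lemma nat_or_two_pow : ∀ (i m : Nat), (m * 2 ^ (i + 1)) ||| 2 ^ i = m * 2 ^ (i + 1) + 2 ^ i := by
  intro i
  induction i with
  | zero =>
    intro m
    have key : m * 2 ^ 1 ||| 2 ^ 0 = Nat.bit false m ||| Nat.bit true 0 := by
      rw [Nat.bit_false_apply, Nat.bit_true_apply]; ring_nf
    rw [key, Nat.lor_bit]
    simp only [Bool.false_or]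
    rw [Nat.bit_true_apply]
    have hm0 : m ||| 0 = m := by simp
    rw [hm0]; ring
  | succ i ih =>
    intro m
    have key : m * 2 ^ (i + 2) ||| 2 ^ (i + 1)
        = Nat.bit false (m * 2 ^ (i + 1)) ||| Nat.bit false (2 ^ i) := by
      rw [Nat.bit_false_apply, Nat.bit_false_apply]; ring_nf
    rw [key, Nat.lor_bit]
    simp only [Bool.or_self]
    rw [ih, Nat.bit_false_apply]
    ring

lemma band_cast_one (m : Nat) : PySem.Int.band (m : Int) 1 = ((m % 2 : Nat) : Int) := by
  have := PySem.Int.band_natCast m 1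
  simpa [Nat.and_one_is_mod] using this

lemma foldl_max_comm : ∀ (l : List Int) (a b : Int), l.foldl max (max a b) = max a (l.foldl max b) := by
  intro l
  induction l with
  | nil => intro a b; rfl
  | cons c t ih =>
    intro a b
    show t.foldl max (max (max a b) c) = max a (t.foldl max (max b c))
    rw [max_assoc, ih]

-- B's leaf test agrees with A's max_circular_gap check
lemma gapOk_eq (n : Int) (mg : Option Int) (mask : Int) :
    gapOkB n mg mask
      = !(mg.elim false (fun g => decide (max_circular_gap (pcs_from_mask mask n) n > g))) := by
  cases mg with
  | none => rfl
  | some g =>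
    simp only [gapOkB, Option.elim]
    set pcs := pcs_from_mask mask n with hpcs
    have hlt : pcs.Pairwise (· < ·) :=
      List.Pairwise.filter _ (PySem.List.pairwise_lt_pyRange_one 0 n)
    have hsorted : PySem.List.sorted pcs (fun x => x) false = pcs :=
      PySem.List.sorted_eq_self_of_pairwise _ _ (hlt.imp le_of_lt)
    by_cases hl : PySem.List.len pcs ≤ 1
    · rw [if_pos hl]
      unfold max_circular_gap
      rw [if_pos hl]
      simp only [← decide_not]
      exact decide_eq_decide.mpr (by omega)
    · rw [if_neg hl]
      have hlen2 : 2 ≤ pcs.length := by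
        simp only [PySem.List.len_eq] at hl; omega
      have hne : pcs ≠ [] := by intro h; rw [h] at hlen2; simp at hlen2
      obtain ⟨p0, t0, ht0⟩ := List.exists_cons_of_ne_nil hne
      have hne2 : t0 ≠ [] := by
        intro h
        rw [h] at ht0; rw [ht0] at hlen2; simp at hlen2
      obtain ⟨q, t, hqt⟩ := List.exists_cons_of_ne_nil hne2
      rw [hqt] at ht0
      -- A's value
      unfold max_circular_gap
      rw [if_neg hl]
      unfold step_vector_from_pcs
      simp only [hsorted]
      rw [if_neg hl]
      rw [PySem.List.slice_from_one]
      set w := PySem.List.pyGetD pcs 0 0 + n - PySem.List.pyGetD pcs (-1) 0 with hw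
      have htail : pcs.tail = q :: t := by rw [ht0]; rfl
      have hzip : pcs.zip pcs.tail = (p0, q) :: ((q :: t).zip t) := by
        rw [ht0]; rfl
      set dt := ((q :: t).zip t).map (fun ab => ab.2 - ab.1) with hdt
      have hdiffs : (pcs.zip pcs.tail).map (fun ab => ab.2 - ab.1) = (q - p0) :: dt := by
        rw [hzip]; rfl
      rw [hdiffs]
      have hmax : PySem.List.max? (((q - p0) :: dt) ++ [w]) (fun x => x)
          = some ((dt ++ [w]).foldl max (q - p0)) := by
        rw [List.cons_append]; exact PySem.List.max?_id_cons _ _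
      rw [hmax]
      simp only [Option.getD_some]
      have hA : (dt ++ [w]).foldl max (q - p0) = max (dt.foldl max (q - p0)) w := by
        rw [List.foldl_append]; rfl
      rw [hA]
      -- B's value
      have hbody : (fun (gg : Int) (ab : Int × Int) =>
            if ab.2 - ab.1 > gg then ab.2 - ab.1 else gg)
          = fun (gg : Int) (ab : Int × Int) => max gg (ab.2 - ab.1) := by
        funext gg ab
        rcases lt_or_ge gg (ab.2 - ab.1) with h | h
        · rw [if_pos h, max_eq_right h.le]
        · rw [if_neg (by omega), max_eq_left h]
      rw [hbody]
      have hB : (pcs.zip pcs.tail).foldl (fun gg ab => max gg (ab.2 - ab.1)) w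
          = ((pcs.zip pcs.tail).map (fun ab => ab.2 - ab.1)).foldl max w := by
        rw [List.foldl_map]
      rw [hB, hdiffs]
      have hB2 : ((q - p0) :: dt).foldl max w = max w (dt.foldl max (q - p0)) := by
        show dt.foldl max (max w (q - p0)) = max w (dt.foldl max (q - p0))
        exact foldl_max_comm dt w (q - p0)
      rw [hB2, max_comm w (dt.foldl max (q - p0))]
      simp only [← decide_not]
      exact decide_eq_decide.mpr (by omega)

-- A is the filter of its keep condition over range(2^n)
lemma A_eq_filter (n : Int) (rr : Bool) (mink : Int) (mk : Option Int) (mg : Option Int) :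
    iter_scale_masks n rr mink mk mg
      = (PySem.List.pyRange 0 ((1 : Int) <<< n.toNat) 1).filter (keepP n mink (mk.getD n) rr mg) := by
  unfold iter_scale_masks
  dsimp only
  have hcongr : ∀ (acc : List Int) (mask : Int),
      mask ∈ PySem.List.pyRange 0 ((1 : Int) <<< n.toNat) 1 →
      (if rr && (PySem.Int.band mask 1 == 0) then acc
       else
         if (PySem.Int.bitCount mask : Int) < mink || (PySem.Int.bitCount mask : Int) > mk.getD n
            || (PySem.Int.bitCount mask : Int) == 0 then acc
         else
           if mg.elim false (fun g => decide (max_circular_gap (pcs_from_mask mask n) n > g)) then acc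
           else acc ++ [mask])
      = (if keepP n mink (mk.getD n) rr mg mask then acc ++ [mask] else acc) := by
    intro acc mask _
    by_cases h1 : (rr && (PySem.Int.band mask 1 == 0)) = true
    · simp [keepP, h1]
    · by_cases h2 : ((PySem.Int.bitCount mask : Int) < mink
          || (PySem.Int.bitCount mask : Int) > mk.getD n
          || (PySem.Int.bitCount mask : Int) == 0) = true
      · simp [keepP, h1, h2]
      · by_cases h3 : (mg.elim false
            (fun g => decide (max_circular_gap (pcs_from_mask mask n) n > g))) = true
        · simp [keepP, h1, h2, h3]
        · simp [keepP, h1, h2, h3]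
  calc (PySem.List.pyRange 0 ((1 : Int) <<< n.toNat) 1).foldl _ []
      = (PySem.List.pyRange 0 ((1 : Int) <<< n.toNat) 1).foldl
          (fun acc mask => if keepP n mink (mk.getD n) rr mg mask then acc ++ [mask] else acc) [] :=
        PySem.List.foldl_congr_mem _ _ _ _ hcongr
    _ = [] ++ (PySem.List.pyRange 0 ((1 : Int) <<< n.toNat) 1).filter (keepP n mink (mk.getD n) rr mg) :=
        PySem.List.foldl_append_if_eq_filter _ _ []
    _ = _ := List.nil_append _

lemma keep_nil_high (n mink mk : Int) (rr : Bool) (mg : Option Int) (i m : Nat)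
    (h : (bcN m : Int) > mk) :
    ((List.range (2 ^ i)).map (fun s => ((m * 2 ^ i + s : Nat) : Int))).filter
      (keepP n mink mk rr mg) = [] := by
  rw [List.filter_eq_nil_iff]
  intro x hx
  obtain ⟨s, hs, rfl⟩ := List.mem_map.mp hx
  have hs' : s < 2 ^ i := List.mem_range.mp hs
  have hbc : PySem.Int.bitCount ((m * 2 ^ i + s : Nat) : Int) = bcN m + bcN s :=
    bc_mul_add i m s hs'
  simp only [keepP, Bool.and_eq_true, Bool.not_eq_true', Bool.or_eq_false_iff]
  intro hcon
  have hk := hcon.1.2.1.2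
  simp only [decide_eq_false_iff_not, not_lt] at hk
  omega

lemma keep_nil_low (n mink mk : Int) (rr : Bool) (mg : Option Int) (i m : Nat)
    (h : (bcN m : Int) + (i : Int) < max mink 1) :
    ((List.range (2 ^ i)).map (fun s => ((m * 2 ^ i + s : Nat) : Int))).filter
      (keepP n mink mk rr mg) = [] := by
  rw [List.filter_eq_nil_iff]
  intro x hx
  obtain ⟨s, hs, rfl⟩ := List.mem_map.mp hx
  have hs' : s < 2 ^ i := List.mem_range.mp hs
  have hbc : PySem.Int.bitCount ((m * 2 ^ i + s : Nat) : Int) = bcN m + bcN s :=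
    bc_mul_add i m s hs'
  have hle : bcN s ≤ i := bc_le i s hs'
  simp only [keepP, Bool.and_eq_true, Bool.not_eq_true', Bool.or_eq_false_iff]
  intro hcon
  have h1 := hcon.1.2.1.1
  have h2 := hcon.1.2.2
  simp only [decide_eq_false_iff_not, not_lt] at h1
  simp only [beq_eq_false_iff_ne, ne_eq] at h2
  -- h1 : mink ≤ bitCount, h2 : bitCount ≠ 0
  rcases max_choice mink 1 with hm | hm <;> rw [hm] at h <;> omega

-- B's DFS computes the filter of A's keep condition over the mask extensions of its prefix
lemma genR_char (n mink mk : Int) (rr : Bool) (mg : Option Int) :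
    ∀ (i : Nat), ∀ (m : Nat), (rr = true → i = 0 → m % 2 = 1) →
      genR mk (max mink 1) n rr mg i ((m * 2 ^ i : Nat) : Int) ((bcN m : Nat) : Int)
        = ((List.range (2 ^ i)).map (fun s => ((m * 2 ^ i + s : Nat) : Int))).filter
            (keepP n mink mk rr mg) := by
  intro i
  induction i with
  | zero =>
    intro m hinv
    rw [genR.eq_def]
    dsimp only
    by_cases hgt : ((bcN m : Nat) : Int) > mk
    · rw [if_pos (by simp [hgt]), keep_nil_high n mink mk rr mg 0 m hgt]
    · by_cases hlow : ((bcN m : Nat) : Int) + ((0 : Nat) : Int) < max mink 1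
      · rw [if_pos (by simp only [Bool.or_eq_true, decide_eq_true_eq]; right; exact hlow),
           keep_nil_low n mink mk rr mg 0 m (by simpa using hlow)]
      · rw [if_neg (by
          simp only [Bool.or_eq_true, decide_eq_true_eq]
          rintro (hc | hc)
          · exact hgt hc
          · exact hlow hc)]
        simp only [pow_zero, Nat.mul_one, List.range_one, List.map_cons, List.map_nil,
          List.filter_singleton, Nat.add_zero]
        have hroot : (!(rr && (PySem.Int.band ((m : Nat) : Int) 1 == 0))) = true := by
          cases hr : rr
          · simp
          · have hm : m % 2 = 1 := hinv hr rfl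
            rw [band_cast_one, hm]
            simp
        have hkcond : (!((PySem.Int.bitCount ((m : Nat) : Int) : Int) < mink
              || (PySem.Int.bitCount ((m : Nat) : Int) : Int) > mk
              || (PySem.Int.bitCount ((m : Nat) : Int) : Int) == 0)) = true := by
          have hlink : PySem.Int.bitCount ((m : Nat) : Int) = bcN m := rfl
          simp only [Nat.cast_zero, add_zero] at hlow
          simp only [hlink, Bool.not_eq_true', Bool.or_eq_false_iff, decide_eq_false_iff_not,
            not_lt, beq_eq_false_iff_ne, ne_eq]
          rcases max_choice mink 1 with hm | hm <;> rw [hm] at hlow <;>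
            exact ⟨⟨by omega, by omega⟩, by omega⟩
        have hkeep : keepP n mink mk rr mg ((m : Nat) : Int)
            = gapOkB n mg ((m : Nat) : Int) := by
          unfold keepP
          rw [hroot, hkcond, gapOk_eq]
          simp
        rw [hkeep]
        cases gapOkB n mg ((m : Nat) : Int) <;> rfl
  | succ i' ih =>
    intro m hinv
    rw [genR.eq_def]
    dsimp only
    by_cases hgt : ((bcN m : Nat) : Int) > mk
    · rw [if_pos (by simp [hgt]), keep_nil_high n mink mk rr mg (i' + 1) m hgt]
    · by_cases hlow : ((bcN m : Nat) : Int) + ((i' + 1 : Nat) : Int) < max mink 1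
      · rw [if_pos (by simp only [Bool.or_eq_true, decide_eq_true_eq]; right; exact hlow),
           keep_nil_low n mink mk rr mg (i' + 1) m (by push_cast; push_cast at hlow; omega)]
      · rw [if_neg (by
          simp only [Bool.or_eq_true, decide_eq_true_eq]
          rintro (hc | hc)
          · exact hgt hc
          · exact hlow hc)]
        have hsplit : List.range (2 ^ (i' + 1))
            = List.range (2 ^ i') ++ (List.range (2 ^ i')).map (2 ^ i' + ·) := by
          rw [← List.range_add]; congr 1; ring
        rw [hsplit, List.map_append, List.filter_append]
        have hlo1 : (fun s => (((m * 2 ^ (i' + 1) + s : Nat) : Int)))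
            = (fun s => (((2 * m) * 2 ^ i' + s : Nat) : Int)) := by
          funext s; congr 1; ring
        congr 1
        · -- exclude-bit half
          by_cases hb : i' = 0 ∧ rr = true
          · obtain ⟨hi0, hrr⟩ := hb
            subst hi0
            rw [if_pos (by simp [hrr])]
            symm
            rw [hlo1, List.filter_eq_nil_iff]
            intro x hx
            obtain ⟨s, hs, rfl⟩ := List.mem_map.mp hx
            have hs' : s = 0 := by simpa using List.mem_range.mp hs
            subst hs'
            simp only [keepP, Bool.and_eq_true, Bool.not_eq_true']
            intro hcon
            have hroot := hcon.1.1
            rw [hrr, band_cast_one] at hroot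
            have hmod : ((2 * m) * 2 ^ 0 + 0) % 2 = 0 := by omega
            rw [hmod] at hroot
            simp at hroot
          · rw [if_neg (by
              simp only [Bool.and_eq_true, beq_iff_eq, not_and]
              intro h1 h2
              exact hb ⟨by omega, h2⟩)]
            have hmask : ((m * 2 ^ (i' + 1) : Nat) : Int) = (((2 * m) * 2 ^ i' : Nat) : Int) := by
              congr 1; ring
            have hk : ((bcN m : Nat) : Int) = ((bcN (2 * m) : Nat) : Int) := by
              rw [bc_double]
            rw [hmask, hk, hlo1]
            exact ih (2 * m) (by
              intro hrr hi0
              exact absurd ⟨hi0, hrr⟩ hb)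
        · -- include-bit half
          have hshift : ((1 : Int) <<< i') = (((2 ^ i' : Nat)) : Int) := by
            rw [Int.shiftLeft_eq']; push_cast; ring
          have hbor : PySem.Int.bor ((m * 2 ^ (i' + 1) : Nat) : Int) ((1 : Int) <<< i')
              = (((2 * m + 1) * 2 ^ i' : Nat) : Int) := by
            rw [hshift, PySem.Int.bor_natCast, nat_or_two_pow]
            congr 1; ring
          have hk : ((bcN m : Nat) : Int) + 1 = ((bcN (2 * m + 1) : Nat) : Int) := by
            rw [bc_double_succ]; push_cast; ring
          have hhi : ((List.range (2 ^ i')).map (2 ^ i' + ·)).map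
                (fun s => (((m * 2 ^ (i' + 1) + s : Nat) : Int)))
              = (List.range (2 ^ i')).map (fun s => (((2 * m + 1) * 2 ^ i' + s : Nat) : Int)) := by
            rw [List.map_map]
            refine List.map_congr_left ?_
            intro s _
            show (((m * 2 ^ (i' + 1) + (2 ^ i' + s) : Nat) : Int)) = _
            congr 1; ring
          rw [hbor, hk, hhi]
          exact ih (2 * m + 1) (by intro _ _; omega)

-- ===== VERDICT (by name: the statement is the Claim_ definition above) =====
theorem iter_scale_masks_spec : Claim_equal_iter_scale_masks := by
  unfold Claim_equal_iter_scale_masks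
  intro n rr mink mk mg _ hpre
  unfold Spec_iter_scale_masks
  rw [A_eq_filter]
  unfold iter_scale_masks_alt
  simp only []
  rcases Nat.eq_zero_or_pos n.toNat with h0 | hpos
  · -- n = 0 : both sides are []
    rw [h0]
    have hl : PySem.List.pyRange 0 ((1 : Int) <<< (0 : Nat)) 1 = [0] := by
      have h01 : ((1 : Int) <<< (0 : Nat)) = 0 + 1 := by decide
      rw [h01]; exact PySem.List.pyRange_one_singleton 0
    rw [hl]
    rw [loopB_spec]
    simp only [List.flatMap_cons, List.flatMap_nil, List.append_nil, List.nil_append]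
    rw [genR.eq_def]
    dsimp only
    rw [if_pos (by
      simp only [Bool.or_eq_true, decide_eq_true_eq]
      right
      have := le_max_right mink 1
      push_cast
      omega)]
    simp [keepP, PySem.Int.bitCount_zero]
  · have hchar := genR_char n mink (mk.getD n) rr mg n.toNat 0 (by intro _ h; omega)
    have hm0 : ((0 * 2 ^ n.toNat : Nat) : Int) = 0 := by push_cast; ring
    have hbc0 : ((bcN 0 : Nat) : Int) = 0 := by
      simp [bcN, PySem.Int.bitCount_zero]
    rw [hm0, hbc0] at hchar
    rw [loopB_spec]
    simp only [List.flatMap_cons, List.flatMap_nil, List.append_nil, List.nil_append]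
    rw [hchar]
    have hrange : PySem.List.pyRange 0 ((1 : Int) <<< n.toNat) 1
        = (List.range (2 ^ n.toNat)).map (fun s => ((0 * 2 ^ n.toNat + s : Nat) : Int)) := by
      rw [PySem.List.pyRange_one]
      have h1 : ((1 : Int) <<< n.toNat) = ((2 ^ n.toNat : Nat) : Int) := by
        rw [Int.shiftLeft_eq']; push_cast; ring
      rw [h1]
      have h2 : (((2 ^ n.toNat : Nat) : Int) - 0).toNat = 2 ^ n.toNat := by
        have hp : 1 ≤ 2 ^ n.toNat := Nat.one_le_two_pow
        omega
      rw [h2]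
      refine List.map_congr_left ?_
      intro s _
      simp
    rw [hrange]
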